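-- pv_equiv track=rewrite | github.com/wolfinabox/Advent-of-code-2020 | days/day5.py | binary_partition
-- ===== SOURCE A (Python) =====
-- def binary_partition(parts:str,top:int):
--     bottom=0
--     for part in parts:
--         half=(top-bottom)//2
--         #top half
--         if int(part):
--             bottom+=half
--         #bottom half
--         else:
--             top-=half
--
--     return bottom
-- ===== SOURCE B (Python) =====
-- def binary_partition(parts: str, top: int):
--     # Closed form: after k narrowing steps the remaining width is ceil(top / 2**k),
--     # independent of the bits, so the '1' at index i contributes
--     # ceil(top/2**i) - ceil(top/2**(i+1)); sum those contributions directly.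
--     m = -top  # ceil(top / 2**k) == -(m // 2**k)
--     return sum(m // 2 ** (i + 1) - m // 2 ** i for i, bit in enumerate(parts) if int(bit))
-- ===== Notes on version B (the rewrite author's own statement) =====
-- stated objective: alternative
-- what changed: A narrows a (bottom, top) range sequentially; B uses the closed form that the remaining width after k steps is ceil(top/2^k) regardless of the bits, so each '1' at index i contributes ceil(top/2^i) - ceil(top/2^(i+1)), summed directly per index with no sequential state.
import Mathlib
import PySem

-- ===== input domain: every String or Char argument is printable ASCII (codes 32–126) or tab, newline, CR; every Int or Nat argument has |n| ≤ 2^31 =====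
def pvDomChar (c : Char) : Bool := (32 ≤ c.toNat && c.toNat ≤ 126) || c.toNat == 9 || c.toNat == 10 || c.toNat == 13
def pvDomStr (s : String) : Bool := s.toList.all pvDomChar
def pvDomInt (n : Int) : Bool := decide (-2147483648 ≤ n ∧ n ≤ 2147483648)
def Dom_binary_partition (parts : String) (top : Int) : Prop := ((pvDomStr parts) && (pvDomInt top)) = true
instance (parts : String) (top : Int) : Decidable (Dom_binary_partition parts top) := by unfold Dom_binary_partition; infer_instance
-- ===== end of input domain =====

-- B replaces A's sequential (bottom, top) narrowing by the per-index closed form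
-- ceil(top/2^i) - ceil(top/2^(i+1)) for each truthy bit: no sequential state, same cost.

-- ===== PORT A =====
-- int(part) for a single character; Pre_ admits only digit characters (Python raises ValueError otherwise)
def pvIntChar (c : Char) : Int := (PySem.Int.ofChars? [c]).getD 0

def binary_partition (parts : String) (top : Int) : Int :=
  (parts.toList.foldl
    (fun (st : Int × Int) part =>
      let half := PySem.Int.floordiv (st.2 - st.1) 2
      if pvIntChar part ≠ 0 then (st.1 + half, st.2) else (st.1, st.2 - half))
    (0, top)).1

-- ===== PORT B =====
-- sum(m // 2**(i+1) - m // 2**i for i, bit in enumerate(parts) if int(bit)), m = -top;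
-- the enumerate index is a nonnegative Int, so 2**i is ported as 2 ^ i.toNat (exact).
def binary_partition_alt (parts : String) (top : Int) : Int :=
  let m := -top
  (PySem.List.enumerate parts.toList).foldl
    (fun acc p =>
      if pvIntChar p.2 ≠ 0 then
        acc + (PySem.Int.floordiv m (2 ^ (p.1.toNat + 1)) - PySem.Int.floordiv m (2 ^ p.1.toNat))
      else acc) 0

-- ===== PRECONDITION & SPEC =====
-- Pre_ excludes strings with a non-digit character, on which Python's int(part) raises ValueError.
def Pre_binary_partition (parts : String) (top : Int) : Prop :=
  parts.toList.all Char.isDigit = true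
instance (parts : String) (top : Int) : Decidable (Pre_binary_partition parts top) := by
  unfold Pre_binary_partition; infer_instance

def pvWitness_binary_partition : String × Int := ("0110100", 128)

def Spec_binary_partition (parts : String) (top : Int) (out : Int) : Prop := out = binary_partition_alt parts top
instance (parts : String) (top : Int) (out : Int) : Decidable (Spec_binary_partition parts top out) := by unfold Spec_binary_partition; infer_instance

-- ===== CLAIM (what is proved, stated in full; the proofs are below) =====
def Claim_equal_binary_partition : Prop := ∀ (parts : String) (top : Int), Dom_binary_partition parts top → Pre_binary_partition parts top → Spec_binary_partition parts top (binary_partition parts top)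

-- ===== LEMMAS AND PROOFS =====

-- the selected-weight sum A computes, as a structural recursion on the bits
def pvSel : List Char → Int → Int
  | [], _ => 0
  | c :: cs, w =>
      (if pvIntChar c ≠ 0 then PySem.Int.floordiv w 2 else 0)
        + pvSel cs (w - PySem.Int.floordiv w 2)

theorem pvA_fold_eq (l : List Char) : ∀ (b t : Int),
    (l.foldl
      (fun (st : Int × Int) part =>
        let half := PySem.Int.floordiv (st.2 - st.1) 2
        if pvIntChar part ≠ 0 then (st.1 + half, st.2) else (st.1, st.2 - half))
      (b, t)).1 = b + pvSel l (t - b) := by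
  induction l with
  | nil => intro b t; simp [pvSel]
  | cons c cs ih =>
    intro b t
    by_cases h : pvIntChar c ≠ 0 <;> simp only [List.foldl_cons, h, pvSel, ih] <;>
      · simp [h]; ring

-- floor division by 2 written as Int ediv
theorem pvFd2 (x : Int) : PySem.Int.floordiv x 2 = x / 2 :=
  PySem.Int.floordiv_eq_ediv_of_pos (by omega)

-- the width after one more step: ceil(w/2) with w = -(m / 2^i) is -(m / 2^(i+1))
theorem pvStepWidth (m : Int) (i : Nat) :
    -(PySem.Int.floordiv m (2 ^ i)) - PySem.Int.floordiv (-(PySem.Int.floordiv m (2 ^ i))) 2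
      = -(PySem.Int.floordiv m (2 ^ (i + 1))) := by
  have hpos : (0 : Int) < 2 ^ i := by positivity
  have hpos' : (0 : Int) < 2 ^ (i + 1) := by positivity
  rw [pvFd2, PySem.Int.floordiv_eq_ediv_of_pos hpos, PySem.Int.floordiv_eq_ediv_of_pos hpos']
  have hc : m / 2 ^ i / 2 = m / 2 ^ (i + 1) := by
    rw [Int.ediv_ediv_of_nonneg (le_of_lt hpos), pow_succ]
  set a := m / 2 ^ i with ha
  rw [← hc]
  omega

-- the half A would add at step i, in closed form
theorem pvStepHalf (m : Int) (i : Nat) :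
    PySem.Int.floordiv (-(PySem.Int.floordiv m (2 ^ i))) 2
      = PySem.Int.floordiv m (2 ^ (i + 1)) - PySem.Int.floordiv m (2 ^ i) := by
  have h := pvStepWidth m i
  omega

-- B's indexed fold equals A's selected-weight sum, generalized over the start index
theorem pvB_fold_eq (l : List Char) (m : Int) : ∀ (i : Nat) (acc : Int),
    ((PySem.List.enumerate l (i : Int)).foldl
      (fun acc p =>
        if pvIntChar p.2 ≠ 0 then
          acc + (PySem.Int.floordiv m (2 ^ (p.1.toNat + 1)) - PySem.Int.floordiv m (2 ^ p.1.toNat))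
        else acc) acc)
      = acc + pvSel l (-(PySem.Int.floordiv m (2 ^ i))) := by
  induction l with
  | nil => intro i acc; simp [PySem.List.enumerate_nil, pvSel]
  | cons c cs ih =>
    intro i acc
    rw [PySem.List.enumerate_cons]
    have hcast : ((i : Int) + 1) = ((i + 1 : Nat) : Int) := by push_cast; ring
    simp only [List.foldl_cons, hcast, ih (i + 1)]
    simp only [pvSel, pvStepWidth m i, Int.toNat_natCast, pvStepHalf m i]
    by_cases h : pvIntChar c ≠ 0 <;> simp [h] <;> ring

-- ===== VERDICT (by name: the statement is the Claim_ definition above) =====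
theorem binary_partition_spec : Claim_equal_binary_partition := by
  intro parts top _ _
  unfold Spec_binary_partition binary_partition binary_partition_alt
  rw [pvA_fold_eq]
  have h0 := pvB_fold_eq parts.toList (-top) 0 0
  simp only [Nat.cast_zero] at h0
  rw [h0]
  have : PySem.Int.floordiv (-top) (2 ^ 0) = -top := by
    rw [PySem.Int.floordiv_eq_ediv_of_pos (by norm_num)]; simp
  rw [this]
  ring_nf
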